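-- pv_equiv track=rewrite | github.com/alexKleider/jeff | parse.py | select_out_ingredient
-- ===== SOURCE A (Python) =====
-- def remove_parens(source):
--     """
--     Accepts a string and returns a list of words
--     without any that were in parens.
--     """
--     ret = []
--     source_listing = source.split()
--     include = True
--     for item in source_listing:
--         if item.startswith("("):
--             include = False
--         if include:
--             ret.append(item)
--         if item.endswith(")"):
--             include = True
--     return ret
--
-- def select_out_ingredient(ingredient, recipes=None):
--     """
--     Attempts to removes quantities, instructions, etc
--     and leave only the name of the ingredient.
--     """
--     content = remove_parens(ingredient)
--     res = []
--     for item in content: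
--         if (not any(c.isdigit() for c in item)
--             and not item in {"few", "oz",
--                 "heaping", "Heaping", "Bar", "bar",
--                 "Spoon", "spoon",
--                 "muddle", "Muddle", "Muddled", "muddled",
--                 "light", "Light", "a", "of", "at", "end",
--                 "dashes", "Dashes", "dash", "Dash",
--                 "Drizzle", "drizzle", "Fresh", "fresh",
--                 "sectioned", "Sectioned", "section", "Section",
--                 "Small", "small", "Garnish", "garnish",
--                 "Piece", "piece", "splash", "Splash",
--                 "Drops", "drops", "Drop", "drop",
--                 }):
--             res.append(item)
--     return ' '.join(res)
-- ===== SOURCE B (Python) =====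
-- # B: span-based recursion — locate each parenthesized span by index search
-- # (first '('-token, first ')'-token at/after it), splice the outside slices,
-- # then filter by digit/stopword; no per-token boolean flag (objective: alternative).
-- STOPWORDS = frozenset({
--     "few", "oz", "heaping", "Heaping", "Bar", "bar", "Spoon", "spoon",
--     "muddle", "Muddle", "Muddled", "muddled", "light", "Light", "a", "of",
--     "at", "end", "dashes", "Dashes", "dash", "Dash", "Drizzle", "drizzle",
--     "Fresh", "fresh", "sectioned", "Sectioned", "section", "Section",
--     "Small", "small", "Garnish", "garnish", "Piece", "piece", "splash",
--     "Splash", "Drops", "drops", "Drop", "drop",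
-- })
--
-- def _outside_parens(tokens):
--     if not tokens:
--         return tokens
--     i = next((k for k, t in enumerate(tokens) if t.startswith("(")), None)
--     if i is None:
--         return tokens
--     rest = tokens[i:]
--     j = next((k for k, t in enumerate(rest) if t.endswith(")")), None)
--     if j is None:
--         return tokens[:i]
--     return tokens[:i] + _outside_parens(rest[j + 1:])
--
-- def select_out_ingredient(ingredient, recipes=None):
--     words = _outside_parens(ingredient.split())
--     return ' '.join(w for w in words
--                     if not any(c.isdigit() for c in w) and w not in STOPWORDS)
-- ===== Notes on version B (the rewrite author's own statement) =====
-- stated objective: alternative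
-- what changed: Replaces the boolean-flag token pass of remove_parens with a span-based recursion that index-searches the first open-paren token and the first close-paren token at or after it, splices the outside slices together, and then filters stopword/digit tokens.
import Mathlib
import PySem

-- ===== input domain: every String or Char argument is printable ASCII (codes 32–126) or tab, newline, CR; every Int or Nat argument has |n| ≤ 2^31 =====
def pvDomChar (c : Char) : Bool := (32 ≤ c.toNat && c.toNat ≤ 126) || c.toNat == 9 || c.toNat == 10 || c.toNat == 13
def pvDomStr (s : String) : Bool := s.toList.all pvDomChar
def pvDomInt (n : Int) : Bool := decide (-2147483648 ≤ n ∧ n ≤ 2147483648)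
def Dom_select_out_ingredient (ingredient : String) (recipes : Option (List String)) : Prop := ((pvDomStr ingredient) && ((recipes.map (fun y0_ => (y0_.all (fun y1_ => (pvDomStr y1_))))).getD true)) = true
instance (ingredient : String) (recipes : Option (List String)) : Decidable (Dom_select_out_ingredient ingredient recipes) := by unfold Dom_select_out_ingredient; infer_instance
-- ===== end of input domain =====

-- B replaces A's boolean-flag pass with a span-based recursion that index-searches each
-- parenthesized span and splices the outside slices (objective: alternative).

-- ===== PORT A =====
-- the stopword set literal of A (set of distinct string literals)
def pvStopwords : List String :=
  ["few", "oz", "heaping", "Heaping", "Bar", "bar", "Spoon", "spoon",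
   "muddle", "Muddle", "Muddled", "muddled", "light", "Light", "a", "of",
   "at", "end", "dashes", "Dashes", "dash", "Dash", "Drizzle", "drizzle",
   "Fresh", "fresh", "sectioned", "Sectioned", "section", "Section",
   "Small", "small", "Garnish", "garnish", "Piece", "piece", "splash",
   "Splash", "Drops", "drops", "Drop", "drop"]

def remove_parens (source : String) : List String :=
  let source_listing := PySem.Str.split₀ source
  let st := source_listing.foldl (fun (s : List String × Bool) item =>
    let s := if PySem.Str.startswith item "(" then (s.1, false) else s
    let s := if s.2 then (s.1 ++ [item], s.2) else s
    if PySem.Str.endswith item ")" then (s.1, true) else s) ([], true)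
  st.1

def select_out_ingredient (ingredient : String) (recipes : Option (List String)) : String :=
  let content := remove_parens ingredient
  let res := content.foldl (fun r item =>
    if !(item.toList.any PySem.Chars.isdigit) && !(pvStopwords.contains item) then r ++ [item]
    else r) []
  PySem.Str.join " " res

-- ===== PORT B =====
-- _outside_parens: empty guard; else find the first open-paren token, then the first
-- close-paren token at or after it, keep the slice before the span, recurse on the slice after.
def outsideParens : List String → List String
  | [] => []
  | t :: ts =>
    match (t :: ts).findIdx? (fun t => PySem.Str.startswith t "(") with
    | none => t :: ts
    | some i =>
      let rest := (t :: ts).drop i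
      match rest.findIdx? (fun t => PySem.Str.endswith t ")") with
      | none => (t :: ts).take i
      | some j => (t :: ts).take i ++ outsideParens (rest.drop (j + 1))
termination_by l => l.length
decreasing_by simp [List.length_drop]; omega

def select_out_ingredient_alt (ingredient : String) (recipes : Option (List String)) : String :=
  let words := outsideParens (PySem.Str.split₀ ingredient)
  PySem.Str.join " "
    (words.filter (fun w => !(w.toList.any PySem.Chars.isdigit) && !(pvStopwords.contains w)))

-- ===== PRECONDITION & SPEC =====
def Spec_select_out_ingredient (ingredient : String) (recipes : Option (List String)) (out : String) : Prop := out = select_out_ingredient_alt ingredient recipes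
instance (ingredient : String) (recipes : Option (List String)) (out : String) : Decidable (Spec_select_out_ingredient ingredient recipes out) := by unfold Spec_select_out_ingredient; infer_instance

-- ===== CLAIM (what is proved, stated in full; the proofs are below) =====
def Claim_equal_select_out_ingredient : Prop := ∀ (ingredient : String) (recipes : Option (List String)), Dom_select_out_ingredient ingredient recipes → Spec_select_out_ingredient ingredient recipes (select_out_ingredient ingredient recipes)

-- ===== LEMMAS AND PROOFS =====

-- A's flag machine as a structural recursion (proof-side characterisation of both ports)
def pvOut : List String → Bool → List String
  | [], _ => []
  | t :: ts, true =>
      if PySem.Chars.startswith t.toList ['('] then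
        (if PySem.Chars.endswith t.toList [')'] then pvOut ts true else pvOut ts false)
      else t :: pvOut ts true
  | t :: ts, false =>
      if PySem.Chars.endswith t.toList [')'] then pvOut ts true else pvOut ts false

-- A's fold step, named (definitionally equal to the lambda in remove_parens)
def pvStepA (s : List String × Bool) (item : String) : List String × Bool :=
  let s := if PySem.Str.startswith item "(" then (s.1, false) else s
  let s := if s.2 then (s.1 ++ [item], s.2) else s
  if PySem.Str.endswith item ")" then (s.1, true) else s

theorem pvStepA_eq (t : String) (b : Bool) (acc : List String) :
    pvStepA (acc, b) t =
      (if PySem.Chars.startswith t.toList ['('] = false ∧ b = true then acc ++ [t] else acc,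
       if PySem.Chars.startswith t.toList ['('] = false ∧ b = true then true
       else PySem.Chars.endswith t.toList [')']) := by
  cases b <;>
    by_cases hs : PySem.Chars.startswith t.toList ['('] = true <;>
    by_cases he : PySem.Chars.endswith t.toList [')'] = true <;>
    simp [pvStepA, hs, he]

-- A's fold equals the flag machine
theorem pvFoldl (ts : List String) : ∀ (b : Bool) (acc : List String),
    (ts.foldl pvStepA (acc, b)).1 = acc ++ pvOut ts b := by
  induction ts with
  | nil => intro b acc; simp [pvOut]
  | cons t ts ih =>
      intro b acc
      rw [List.foldl_cons, pvStepA_eq, ih]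
      by_cases hs : PySem.Chars.startswith t.toList ['('] = true <;>
        by_cases he : PySem.Chars.endswith t.toList [')'] = true <;>
        cases b <;>
        simp [pvOut, hs, he, List.append_assoc]

-- the False state skips to just past the first close-paren token, then runs the True state
theorem pvOut_false_eq (ts : List String) :
    pvOut ts false =
      (match ts.findIdx? (fun t => PySem.Chars.endswith t.toList [')']) with
       | none => []
       | some j => pvOut (ts.drop (j + 1)) true) := by
  induction ts with
  | nil => simp [pvOut]
  | cons t ts ih =>
      by_cases he : PySem.Chars.endswith t.toList [')'] = true
      · simp [pvOut, he, List.findIdx?_cons]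
      · rw [List.findIdx?_cons]
        cases h : ts.findIdx? (fun t => PySem.Chars.endswith t.toList [')']) with
        | none => simp [pvOut, he, h] at ih ⊢; exact ih
        | some j => simp [pvOut, he, h] at ih ⊢; exact ih

-- with no open-paren token the True state keeps everything
theorem pvOut_true_of_none (ts : List String)
    (h : ts.findIdx? (fun t => PySem.Chars.startswith t.toList ['(']) = none) :
    pvOut ts true = ts := by
  induction ts with
  | nil => simp [pvOut]
  | cons t ts ih =>
      rw [List.findIdx?_cons] at h
      by_cases hs : PySem.Chars.startswith t.toList ['('] = true
      · simp [hs] at h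
      · rw [if_neg hs, Option.map_eq_none_iff] at h
        simp [pvOut, hs, ih h]

-- the True state keeps everything before the first open-paren token and, from it on,
-- behaves like the False state
theorem pvOut_true_split (l : List String) : ∀ (i : Nat),
    l.findIdx? (fun t => PySem.Chars.startswith t.toList ['(']) = some i →
    pvOut l true = l.take i ++ pvOut (l.drop i) false := by
  induction l with
  | nil => intro i h; simp at h
  | cons t ts ih =>
      intro i h
      rw [List.findIdx?_cons] at h
      by_cases hs : PySem.Chars.startswith t.toList ['('] = true
      · simp [hs] at h
        subst h
        by_cases he : PySem.Chars.endswith t.toList [')'] = true <;>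
          simp [pvOut, hs, he]
      · simp [hs] at h
        obtain ⟨i', hi', rfl⟩ := h
        simp [pvOut, hs, ih i' hi']

-- B's span recursion equals the flag machine
theorem outsideParens_eq_pvOut : ∀ (n : Nat) (ts : List String), ts.length ≤ n →
    outsideParens ts = pvOut ts true := by
  intro n
  induction n with
  | zero =>
      intro ts h
      cases ts with
      | nil => simp [outsideParens, pvOut]
      | cons t ts => simp at h
  | succ n ih =>
      intro ts hlen
      cases ts with
      | nil => simp [outsideParens, pvOut]
      | cons t ts =>
          rw [outsideParens]
          simp only [pysem]
          rw [show "(".toList = ['('] from rfl, show ")".toList = [')'] from rfl]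
          cases h : List.findIdx? (fun t => PySem.Chars.startswith t.toList ['(']) (t :: ts) with
          | none => exact (pvOut_true_of_none _ h).symm
          | some i =>
              simp only
              rw [pvOut_true_split (t :: ts) i h, pvOut_false_eq]
              cases h2 : List.findIdx? (fun t => PySem.Chars.endswith t.toList [')'])
                  (List.drop i (t :: ts)) with
              | none => simp
              | some j =>
                  exact congrArg (fun l => List.take i (t :: ts) ++ l)
                    (ih (((t :: ts).drop i).drop (j + 1))
                      (by simp [List.length_drop] at hlen ⊢; omega))

theorem remove_parens_eq (source : String) :
    remove_parens source = outsideParens (PySem.Str.split₀ source) := by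
  unfold remove_parens
  rw [show (fun (s : List String × Bool) item =>
    let s := if PySem.Str.startswith item "(" then (s.1, false) else s
    let s := if s.2 then (s.1 ++ [item], s.2) else s
    if PySem.Str.endswith item ")" then (s.1, true) else s) = pvStepA from rfl]
  rw [pvFoldl (PySem.Str.split₀ source) true []]
  rw [outsideParens_eq_pvOut (PySem.Str.split₀ source).length _ le_rfl]
  simp

-- ===== VERDICT (by name: the statement is the Claim_ definition above) =====
theorem select_out_ingredient_spec : Claim_equal_select_out_ingredient := by
  intro ingredient recipes _
  show select_out_ingredient ingredient recipes = select_out_ingredient_alt ingredient recipes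
  unfold select_out_ingredient select_out_ingredient_alt
  simp only [remove_parens_eq, PySem.List.foldl_append_if_eq_filter, List.nil_append]
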